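-- pv_equiv track=rewrite | github.com/Ohjinn/algo-py | programmers/level1/공원산책.py | check_avail
-- ===== SOURCE A (Python) =====
-- def check_avail(park, now, direction, count):
--     width, height = len(park[0]), len(park)
--     x, y = now[0], now[1]
--     if direction == 'E':
--         for _ in range(count):
--             x += 1
--             if x >= width or park[y][x] == 'X':
--                 return False
--     elif direction == 'S':
--         for _ in range(count):
--             y += 1
--             if y >= height or park[y][x] == 'X':
--                 return False
--     elif direction == 'W':
--         for _ in range(count):
--             x -= 1
--             if x < 0 or park[y][x] == 'X':
--                 return False
--     elif direction == 'N':
--         for _ in range(count):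
--             y -= 1
--             if y < 0 or park[y][x] == 'X':
--                 return False
--     return True
-- ===== SOURCE B (Python) =====
-- def check_avail(park, now, direction, count):
--     # Instead of walking cell by cell, check the endpoint bound arithmetically and
--     # test for an obstacle with a single membership query on the traversed segment
--     # (a row slice for E/W, an extracted column segment for S/N).
--     if count <= 0:
--         return True
--     x, y = now[0], now[1]
--     if direction == 'E':
--         return x + count < len(park[0]) and 'X' not in park[y][x + 1:x + count + 1]
--     if direction == 'W':
--         return x - count >= 0 and 'X' not in park[y][x - count:x]
--     if direction == 'S':
--         return y + count < len(park) and 'X' not in [row[x] for row in park[y + 1:y + count + 1]]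
--     if direction == 'N':
--         return y - count >= 0 and 'X' not in [row[x] for row in park[y - count:y]]
--     return True
-- ===== Notes on version B (the rewrite author's own statement) =====
-- stated objective: alternative
-- what changed: A walks the path cell by cell in four copy-pasted loops with early returns; B replaces the walk by one arithmetic endpoint bound check plus a single obstacle-membership test on the traversed segment ('X' not in a row slice for E/W, or in an extracted column segment for S/N).
-- outside the precondition, e.g. on check_avail(['XOO'], [-2, -1], 'E', 2): A returns False, B returns True; on check_avail(['OX', 'O'], [0, 0], 'S', 1): A returns True, B returns True
import Mathlib
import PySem

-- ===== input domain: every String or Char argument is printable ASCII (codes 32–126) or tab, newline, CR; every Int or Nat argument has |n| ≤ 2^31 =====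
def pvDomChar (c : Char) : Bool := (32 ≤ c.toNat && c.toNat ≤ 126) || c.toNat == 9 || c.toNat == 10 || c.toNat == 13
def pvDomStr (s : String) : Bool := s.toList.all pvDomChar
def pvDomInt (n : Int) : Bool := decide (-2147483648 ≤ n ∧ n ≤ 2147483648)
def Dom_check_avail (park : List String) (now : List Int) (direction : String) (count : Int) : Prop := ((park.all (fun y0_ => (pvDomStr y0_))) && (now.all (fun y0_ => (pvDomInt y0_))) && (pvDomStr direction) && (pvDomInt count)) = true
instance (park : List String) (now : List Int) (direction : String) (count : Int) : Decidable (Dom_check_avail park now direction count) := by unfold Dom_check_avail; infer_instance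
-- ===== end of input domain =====

-- B replaces A's four per-step walking loops by an arithmetic endpoint bound check plus a single
-- obstacle-membership test on the traversed segment (row slice for E/W, extracted column for S/N).

-- park[y][x] as Python evaluates it (none exactly where Python raises)
def pvCell (park : List String) (y x : Int) : Option Char :=
  (PySem.List.pyGet? park y).bind fun r => PySem.Str.pyGet? r x

-- ===== PORT A =====
def pvLoopE (park : List String) (width y : Int) : Nat → Int → Bool
  | 0, _ => true
  | Nat.succ n, x =>
    let x' := x + 1
    if width ≤ x' ∨ pvCell park y x' = some 'X' then false
    else pvLoopE park width y n x'

def pvLoopS (park : List String) (height x : Int) : Nat → Int → Bool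
  | 0, _ => true
  | Nat.succ n, y =>
    let y' := y + 1
    if height ≤ y' ∨ pvCell park y' x = some 'X' then false
    else pvLoopS park height x n y'

def pvLoopW (park : List String) (y : Int) : Nat → Int → Bool
  | 0, _ => true
  | Nat.succ n, x =>
    let x' := x - 1
    if x' < 0 ∨ pvCell park y x' = some 'X' then false
    else pvLoopW park y n x'

def pvLoopN (park : List String) (x : Int) : Nat → Int → Bool
  | 0, _ => true
  | Nat.succ n, y =>
    let y' := y - 1
    if y' < 0 ∨ pvCell park y' x = some 'X' then false
    else pvLoopN park x n y'

def check_avail (park : List String) (now : List Int) (direction : String) (count : Int) : Bool :=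
  let width : Int := PySem.Str.len ((PySem.List.pyGet? park 0).getD "")
  let x : Int := (PySem.List.pyGet? now 0).getD 0
  let y : Int := (PySem.List.pyGet? now 1).getD 0
  if direction = "E" then pvLoopE park width y count.toNat x
  else if direction = "S" then pvLoopS park (park.length : Int) x count.toNat y
  else if direction = "W" then pvLoopW park y count.toNat x
  else if direction = "N" then pvLoopN park x count.toNat y
  else true

-- ===== PORT B =====
-- [row[x] for row in park[a:b]]  (the .getD ' ' replaces Python's IndexError; Pre_ keeps it unreached)
def pvColSeg (park : List String) (x a b : Int) : List Char :=
  (PySem.List.slice park (some a) (some b)).map (fun r => (PySem.Str.pyGet? r x).getD ' ')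

def check_avail_alt (park : List String) (now : List Int) (direction : String) (count : Int) : Bool :=
  if count ≤ 0 then true
  else
    let x : Int := (PySem.List.pyGet? now 0).getD 0
    let y : Int := (PySem.List.pyGet? now 1).getD 0
    let row : String := (PySem.List.pyGet? park y).getD ""   -- park[y]; Pre_ keeps it in range where used
    if direction = "E" then
      decide (x + count < PySem.Str.len ((PySem.List.pyGet? park 0).getD "")) &&
      !(PySem.Str.isIn "X" (PySem.Str.slice row (some (x + 1)) (some (x + count + 1))))
    else if direction = "W" then
      decide (0 ≤ x - count) &&
      !(PySem.Str.isIn "X" (PySem.Str.slice row (some (x - count)) (some x)))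
    else if direction = "S" then
      decide (y + count < (park.length : Int)) &&
      !((pvColSeg park x (y + 1) (y + count + 1)).contains 'X')
    else if direction = "N" then
      decide (0 ≤ y - count) &&
      !((pvColSeg park x (y - count) y).contains 'X')
    else true

-- ===== PRECONDITION & SPEC =====
-- Pre_ restricts to the task's natural domain: nonempty park, a start coordinate pair, and a walk
-- that is either vacuous (count ≤ 0 / unknown direction), immediately out of bounds in the walk's
-- direction (A fails fast without indexing), or starts inside a rectangular grid; outside it A
-- either raises IndexError or its value depends on Python's negative-index wraparound, which is
-- accidental (B's slice arithmetic treats such cells as out of bounds).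
def Pre_check_avail (park : List String) (now : List Int) (direction : String) (count : Int) : Prop :=
  park ≠ [] ∧ 2 ≤ now.length ∧
  (let width : Int := PySem.Str.len ((PySem.List.pyGet? park 0).getD "")
   let x : Int := (PySem.List.pyGet? now 0).getD 0
   let y : Int := (PySem.List.pyGet? now 1).getD 0
   count ≤ 0 ∨
   (direction ≠ "E" ∧ direction ≠ "S" ∧ direction ≠ "W" ∧ direction ≠ "N") ∨
   (direction = "E" ∧ width ≤ x + 1) ∨
   (direction = "S" ∧ (park.length : Int) ≤ y + 1) ∨
   (direction = "W" ∧ x ≤ 0) ∨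
   (direction = "N" ∧ y ≤ 0) ∨
   ((∀ r ∈ park, PySem.Str.len r = width) ∧
    0 ≤ x ∧ x < width ∧ 0 ≤ y ∧ y < (park.length : Int)))
instance (park : List String) (now : List Int) (direction : String) (count : Int) : Decidable (Pre_check_avail park now direction count) := by unfold Pre_check_avail; infer_instance

def pvWitness_check_avail : List String × List Int × String × Int := (["OSO", "OOX"], [0, 1], "E", 2)

def Spec_check_avail (park : List String) (now : List Int) (direction : String) (count : Int) (out : Bool) : Prop := out = check_avail_alt park now direction count
instance (park : List String) (now : List Int) (direction : String) (count : Int) (out : Bool) : Decidable (Spec_check_avail park now direction count out) := by unfold Spec_check_avail; infer_instance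

-- ===== CLAIM (what is proved, stated in full; the proofs are below) =====
def Claim_equal_check_avail : Prop := ∀ (park : List String) (now : List Int) (direction : String) (count : Int), Dom_check_avail park now direction count → Pre_check_avail park now direction count → Spec_check_avail park now direction count (check_avail park now direction count)

-- ===== LEMMAS AND PROOFS =====

lemma cell_eq (park : List String) (y : Int) (row : String)
    (hy : PySem.List.pyGet? park y = some row) (j : Int) (hj : 0 ≤ j) :
    pvCell park y j = row.toList[j.toNat]? := by
  rw [pvCell, hy, Option.bind_some]
  conv_lhs => rw [show j = ((j.toNat : Nat) : Int) by omega]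
  rw [PySem.Str.pyGet?_natCast]

-- the four walking loops, characterised by "endpoint in bounds and no 'X' on the way"
lemma loopE_iff (park : List String) (y width : Int) (row : String)
    (hy : PySem.List.pyGet? park y = some row) :
    ∀ (n : Nat) (x : Int), 0 ≤ x → x < width →
      (pvLoopE park width y n x = true ↔
        (x + n < width ∧ ∀ k : Nat, x < (k : Int) → (k : Int) ≤ x + n → row.toList[k]? ≠ some 'X')) := by
  intro n
  induction n with
  | zero =>
    intro x hx hxw
    simp only [pvLoopE, Nat.cast_zero, add_zero]
    constructor
    · intro _; exact ⟨hxw, fun k h1 h2 => absurd (lt_of_lt_of_le h1 h2) (lt_irrefl _)⟩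
    · intro _; trivial
  | succ n ih =>
    intro x hx hxw
    simp only [pvLoopE]
    by_cases hc : width ≤ x + 1 ∨ pvCell park y (x + 1) = some 'X'
    · rw [if_pos hc]
      simp only [Bool.false_eq_true, false_iff, not_and, not_forall]
      intro hb
      rcases hc with h | h
      · exact absurd hb (by push_cast; omega)
      · refine ⟨(x + 1).toNat, by omega, by push_cast; omega, ?_⟩
        rw [← cell_eq park y row hy (x + 1) (by omega)]
        simpa using h
    · rw [if_neg hc]
      push Not at hc
      obtain ⟨h1, h2⟩ := hc
      rw [cell_eq park y row hy (x + 1) (by omega)] at h2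
      rw [ih (x + 1) (by omega) (by omega)]
      constructor
      · rintro ⟨hb, hall⟩
        refine ⟨by push_cast at hb ⊢; omega, fun k hk1 hk2 => ?_⟩
        by_cases hke : (k : Int) = x + 1
        · have : k = (x + 1).toNat := by omega
          rw [this]; exact h2
        · exact hall k (by omega) (by push_cast at hk2 ⊢; omega)
      · rintro ⟨hb, hall⟩
        exact ⟨by push_cast at hb ⊢; omega,
          fun k hk1 hk2 => hall k (by omega) (by push_cast at hk2 ⊢; omega)⟩

lemma loopW_iff (park : List String) (y : Int) (row : String)
    (hy : PySem.List.pyGet? park y = some row) :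
    ∀ (n : Nat) (x : Int), 0 ≤ x →
      (pvLoopW park y n x = true ↔
        (0 ≤ x - n ∧ ∀ k : Nat, x - n ≤ (k : Int) → (k : Int) < x → row.toList[k]? ≠ some 'X')) := by
  intro n
  induction n with
  | zero =>
    intro x hx
    simp only [pvLoopW, Nat.cast_zero, sub_zero]
    constructor
    · intro _; exact ⟨hx, fun k h1 h2 => absurd (lt_of_le_of_lt h1 h2) (lt_irrefl _)⟩
    · intro _; trivial
  | succ n ih =>
    intro x hx
    simp only [pvLoopW]
    by_cases hc : x - 1 < 0 ∨ pvCell park y (x - 1) = some 'X'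
    · rw [if_pos hc]
      simp only [Bool.false_eq_true, false_iff, not_and, not_forall]
      intro hb
      rcases hc with h | h
      · exact absurd hb (by push_cast; omega)
      · refine ⟨(x - 1).toNat, by push_cast at hb ⊢; omega, by omega, ?_⟩
        rw [← cell_eq park y row hy (x - 1) (by omega)]
        simpa using h
    · rw [if_neg hc]
      push Not at hc
      obtain ⟨h1, h2⟩ := hc
      rw [cell_eq park y row hy (x - 1) (by omega)] at h2
      rw [ih (x - 1) (by omega)]
      constructor
      · rintro ⟨hb, hall⟩
        refine ⟨by push_cast at hb ⊢; omega, fun k hk1 hk2 => ?_⟩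
        by_cases hke : (k : Int) = x - 1
        · have : k = (x - 1).toNat := by omega
          rw [this]; exact h2
        · exact hall k (by push_cast at hk1 ⊢; omega) (by omega)
      · rintro ⟨hb, hall⟩
        exact ⟨by push_cast at hb ⊢; omega,
          fun k hk1 hk2 => hall k (by push_cast at hk1 ⊢; omega) (by omega)⟩

lemma loopS_iff (park : List String) (x height : Int) (hh : height = (park.length : Int)) :
    ∀ (n : Nat) (y : Int), 0 ≤ y → y < height →
      (pvLoopS park height x n y = true ↔
        (y + n < height ∧ ∀ k : Nat, y < (k : Int) → (k : Int) ≤ y + n → pvCell park (k : Int) x ≠ some 'X')) := by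
  intro n
  induction n with
  | zero =>
    intro y hy hyh
    simp only [pvLoopS, Nat.cast_zero, add_zero]
    constructor
    · intro _; exact ⟨hyh, fun k h1 h2 => absurd (lt_of_lt_of_le h1 h2) (lt_irrefl _)⟩
    · intro _; trivial
  | succ n ih =>
    intro y hy hyh
    simp only [pvLoopS]
    by_cases hc : height ≤ y + 1 ∨ pvCell park (y + 1) x = some 'X'
    · rw [if_pos hc]
      simp only [Bool.false_eq_true, false_iff, not_and, not_forall]
      intro hb
      rcases hc with h | h
      · exact absurd hb (by push_cast; omega)
      · refine ⟨(y + 1).toNat, by omega, by push_cast; omega, ?_⟩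
        have : ((y + 1).toNat : Int) = y + 1 := by omega
        rw [this]; simpa using h
    · rw [if_neg hc]
      push Not at hc
      obtain ⟨h1, h2⟩ := hc
      rw [ih (y + 1) (by omega) (by omega)]
      constructor
      · rintro ⟨hb, hall⟩
        refine ⟨by push_cast at hb ⊢; omega, fun k hk1 hk2 => ?_⟩
        by_cases hke : (k : Int) = y + 1
        · rw [hke]; exact h2
        · exact hall k (by omega) (by push_cast at hk2 ⊢; omega)
      · rintro ⟨hb, hall⟩
        exact ⟨by push_cast at hb ⊢; omega,
          fun k hk1 hk2 => hall k (by omega) (by push_cast at hk2 ⊢; omega)⟩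

lemma loopN_iff (park : List String) (x : Int) :
    ∀ (n : Nat) (y : Int), 0 ≤ y →
      (pvLoopN park x n y = true ↔
        (0 ≤ y - n ∧ ∀ k : Nat, y - n ≤ (k : Int) → (k : Int) < y → pvCell park (k : Int) x ≠ some 'X')) := by
  intro n
  induction n with
  | zero =>
    intro y hy
    simp only [pvLoopN, Nat.cast_zero, sub_zero]
    constructor
    · intro _; exact ⟨hy, fun k h1 h2 => absurd (lt_of_le_of_lt h1 h2) (lt_irrefl _)⟩
    · intro _; trivial
  | succ n ih =>
    intro y hy
    simp only [pvLoopN]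
    by_cases hc : y - 1 < 0 ∨ pvCell park (y - 1) x = some 'X'
    · rw [if_pos hc]
      simp only [Bool.false_eq_true, false_iff, not_and, not_forall]
      intro hb
      rcases hc with h | h
      · exact absurd hb (by push_cast; omega)
      · refine ⟨(y - 1).toNat, by push_cast at hb ⊢; omega, by omega, ?_⟩
        have : ((y - 1).toNat : Int) = y - 1 := by omega
        rw [this]; simpa using h
    · rw [if_neg hc]
      push Not at hc
      obtain ⟨h1, h2⟩ := hc
      rw [ih (y - 1) (by omega)]
      constructor
      · rintro ⟨hb, hall⟩
        refine ⟨by push_cast at hb ⊢; omega, fun k hk1 hk2 => ?_⟩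
        by_cases hke : (k : Int) = y - 1
        · rw [hke]; exact h2
        · exact hall k (by push_cast at hk1 ⊢; omega) (by omega)
      · rintro ⟨hb, hall⟩
        exact ⟨by push_cast at hb ⊢; omega,
          fun k hk1 hk2 => hall k (by push_cast at hk1 ⊢; omega) (by omega)⟩

-- membership of 'X' in a drop/take window, by index
lemma mem_window_iff (l : List Char) (a n : Nat) :
    'X' ∈ (l.drop a).take n ↔ ∃ k : Nat, a ≤ k ∧ k < a + n ∧ l[k]? = some 'X' := by
  rw [List.mem_iff_getElem?]
  constructor
  · rintro ⟨i, hi⟩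
    rw [List.getElem?_take] at hi
    split at hi
    · rw [List.getElem?_drop] at hi
      exact ⟨a + i, by omega, by omega, hi⟩
    · exact absurd hi (by simp)
  · rintro ⟨k, hk1, hk2, hk3⟩
    refine ⟨k - a, ?_⟩
    rw [List.getElem?_take, if_pos (by omega), List.getElem?_drop]
    have : a + (k - a) = k := by omega
    rw [this]; exact hk3

-- 'X' in s[a:b]  (string side, nonnegative bounds)
lemma isIn_slice_iff (row : String) (a b : Int) (ha : 0 ≤ a) (hb : 0 ≤ b) :
    PySem.Str.isIn "X" (PySem.Str.slice row (some a) (some b)) = true ↔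
      ∃ k : Nat, a ≤ (k : Int) ∧ (k : Int) < b ∧ row.toList[k]? = some 'X' := by
  rw [PySem.Str.isIn_iff_infix]
  have hslice : (PySem.Str.slice row (some a) (some b)).toList
      = (row.toList.drop a.toNat).take (b.toNat - a.toNat) := by
    rw [PySem.Str.toList_slice, PySem.Chars.slice_eq_listSlice, PySem.List.slice_toNat _ ha hb]
  rw [hslice]
  show ['X'] <:+: _ ↔ _
  rw [List.singleton_infix_iff, mem_window_iff]
  constructor
  · rintro ⟨k, h1, h2, h3⟩
    refine ⟨k, by omega, ?_, h3⟩
    have hlt : k < b.toNat := by omega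
    omega
  · rintro ⟨k, h1, h2, h3⟩
    exact ⟨k, by omega, by omega, h3⟩

-- 'X' in the extracted column segment [row[x] for row in park[a:b]]
lemma colSeg_contains_iff (park : List String) (x a b : Int) (ha : 0 ≤ a) (hb : 0 ≤ b)
    (hx : 0 ≤ x)
    (hwide : ∀ r ∈ park, x < (r.toList.length : Int)) :
    (pvColSeg park x a b).contains 'X' = true ↔
      ∃ k : Nat, a ≤ (k : Int) ∧ (k : Int) < b ∧ pvCell park (k : Int) x = some 'X' := by
  have hget : ∀ r ∈ park, PySem.Str.pyGet? r x = some (r.toList[x.toNat]?.getD ' ') := by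
    intro r hr
    have hxr := hwide r hr
    conv_lhs => rw [show x = ((x.toNat : Nat) : Int) by omega]
    rw [PySem.Str.pyGet?_natCast]
    simp [List.getElem?_eq_getElem (show x.toNat < r.toList.length by omega)]
  rw [pvColSeg, PySem.List.slice_toNat _ ha hb, List.contains_eq_mem, decide_eq_true_iff,
      List.mem_map]
  constructor
  · rintro ⟨r, hr, hrx⟩
    rw [List.mem_iff_getElem?] at hr
    obtain ⟨i, hi⟩ := hr
    rw [List.getElem?_take] at hi
    split at hi
    · rw [List.getElem?_drop] at hi
      have hmem : r ∈ park := List.mem_of_getElem? hi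
      refine ⟨a.toNat + i, by omega, by omega, ?_⟩
      rw [pvCell, PySem.List.pyGet?_natCast, hi, Option.bind_some, hget r hmem]
      rw [hget r hmem] at hrx
      simp at hrx
      rw [hrx]
    · exact absurd hi (by simp)
  · rintro ⟨k, h1, h2, h3⟩
    rw [pvCell] at h3
    rcases hpy : PySem.List.pyGet? park (k : Int) with _ | r
    · rw [hpy] at h3; exact absurd h3 (by simp)
    · rw [hpy, Option.bind_some] at h3
      have hklen : k < park.length := by
        by_contra hk
        rw [PySem.List.pyGet?_natCast, List.getElem?_eq_none (by omega)] at hpy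
        exact absurd hpy (by simp)
      have hmem : r ∈ (park.drop a.toNat).take (b.toNat - a.toNat) := by
        rw [List.mem_iff_getElem?]
        refine ⟨k - a.toNat, ?_⟩
        rw [List.getElem?_take, if_pos (by omega), List.getElem?_drop,
            show a.toNat + (k - a.toNat) = k by omega]
        rw [PySem.List.pyGet?_natCast] at hpy
        exact hpy
      refine ⟨r, hmem, ?_⟩
      rw [h3]; rfl

lemma pvRowFacts (park : List String) (y width : Int)
    (huni : ∀ r ∈ park, PySem.Str.len r = width) (hy0 : 0 ≤ y) (hyh : y < (park.length : Int)) :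
    ∃ row, PySem.List.pyGet? park y = some row ∧ (row.toList.length : Int) = width := by
  have hylt : y.toNat < park.length := by omega
  refine ⟨park[y.toNat], ?_, ?_⟩
  · conv_lhs => rw [show y = ((y.toNat : Nat) : Int) by omega]
    rw [PySem.List.pyGet?_natCast, List.getElem?_eq_getElem hylt]
  · have := huni park[y.toNat] (List.getElem_mem hylt)
    simpa [PySem.Str.len_eq] using this

lemma bside_iff (p : Prop) [Decidable p] (q : Bool) :
    (decide p && !q) = true ↔ p ∧ ¬(q = true) := by simp

-- ===== VERDICT (by name: the statement is the Claim_ definition above) =====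
theorem check_avail_spec : Claim_equal_check_avail := by
  intro park now direction count _ hpre
  unfold Spec_check_avail
  obtain ⟨hne, -, hcase⟩ := hpre
  simp only at hcase
  set width : Int := PySem.Str.len ((PySem.List.pyGet? park 0).getD "") with hw
  set x : Int := (PySem.List.pyGet? now 0).getD 0 with hxd
  set y : Int := (PySem.List.pyGet? now 1).getD 0 with hyd
  by_cases hcnt : count ≤ 0
  · have h0 : count.toNat = 0 := by omega
    simp only [check_avail, check_avail_alt, if_pos hcnt, h0]
    split_ifs <;> rfl
  · simp only [check_avail, check_avail_alt, if_neg hcnt]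
    by_cases hE : direction = "E"
    · subst hE
      simp only [String.reduceEq, reduceIte]
      rcases hcase with hc | ⟨h, -⟩ | ⟨-, hoob⟩ | ⟨h, -⟩ | ⟨h, -⟩ | ⟨h, -⟩ | ⟨huni, hx0, hxw, hy0, hyh⟩
      · omega
      · exact absurd rfl h
      · have hA : pvLoopE park width y count.toNat x = false := by
          cases hn : count.toNat with
          | zero => omega
          | succ n => simp only [pvLoopE]; rw [if_pos (Or.inl (by omega))]
        rw [hA, decide_eq_false (by omega), Bool.false_and]
      · exact absurd h (by decide)
      · exact absurd h (by decide)
      · exact absurd h (by decide)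
      · obtain ⟨row, hy, -⟩ := pvRowFacts park y width huni hy0 hyh
        rw [hy]
        simp only [Option.getD_some]
        rw [Bool.eq_iff_iff, loopE_iff park y width row hy count.toNat x hx0 hxw, bside_iff,
          isIn_slice_iff row (x + 1) (x + count + 1) (by omega) (by omega)]
        constructor
        · rintro ⟨hb, h⟩
          refine ⟨by omega, ?_⟩
          rintro ⟨k, hk1, hk2, hk3⟩
          exact h k (by omega) (by omega) hk3
        · rintro ⟨hb, h⟩
          exact ⟨by omega, fun k hk1 hk2 hk3 => h ⟨k, by omega, by omega, hk3⟩⟩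
    by_cases hW : direction = "W"
    · subst hW
      simp only [String.reduceEq, reduceIte]
      rcases hcase with hc | ⟨-, -, h, -⟩ | ⟨h, -⟩ | ⟨h, -⟩ | ⟨-, hoob⟩ | ⟨h, -⟩ | ⟨huni, hx0, hxw, hy0, hyh⟩
      · omega
      · exact absurd rfl h
      · exact absurd h (by decide)
      · exact absurd h (by decide)
      · have hA : pvLoopW park y count.toNat x = false := by
          cases hn : count.toNat with
          | zero => omega
          | succ n => simp only [pvLoopW]; rw [if_pos (Or.inl (by omega))]
        rw [hA, decide_eq_false (by omega), Bool.false_and]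
      · exact absurd h (by decide)
      · obtain ⟨row, hy, -⟩ := pvRowFacts park y width huni hy0 hyh
        rw [hy]
        simp only [Option.getD_some]
        by_cases hxa : 0 ≤ x - count
        · rw [Bool.eq_iff_iff, loopW_iff park y row hy count.toNat x hx0, bside_iff,
            isIn_slice_iff row (x - count) x (by omega) hx0]
          constructor
          · rintro ⟨hb, h⟩
            refine ⟨by omega, ?_⟩
            rintro ⟨k, hk1, hk2, hk3⟩
            exact h k (by omega) (by omega) hk3
          · rintro ⟨hb, h⟩
            exact ⟨by omega, fun k hk1 hk2 hk3 => h ⟨k, by omega, by omega, hk3⟩⟩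
        · have hA : pvLoopW park y count.toNat x = false := by
            rw [← Bool.not_eq_true]
            rw [loopW_iff park y row hy count.toNat x hx0]
            rintro ⟨h, -⟩; omega
          rw [hA, decide_eq_false (by omega), Bool.false_and]
    by_cases hS : direction = "S"
    · subst hS
      simp only [String.reduceEq, reduceIte]
      rcases hcase with hc | ⟨-, h, -⟩ | ⟨h, -⟩ | ⟨-, hoob⟩ | ⟨h, -⟩ | ⟨h, -⟩ | ⟨huni, hx0, hxw, hy0, hyh⟩
      · omega
      · exact absurd rfl h
      · exact absurd h (by decide)
      · have hA : pvLoopS park (park.length : Int) x count.toNat y = false := by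
          cases hn : count.toNat with
          | zero => omega
          | succ n => simp only [pvLoopS]; rw [if_pos (Or.inl (by omega))]
        rw [hA, decide_eq_false (by omega), Bool.false_and]
      · exact absurd h (by decide)
      · exact absurd h (by decide)
      · have hwide : ∀ r ∈ park, x < (r.toList.length : Int) := by
          intro r hr
          have := huni r hr
          simp only [PySem.Str.len_eq] at this
          omega
        rw [Bool.eq_iff_iff, loopS_iff park x (park.length : Int) rfl count.toNat y hy0 hyh,
          bside_iff, colSeg_contains_iff park x (y + 1) (y + count + 1) (by omega) (by omega) hx0 hwide]
        constructor
        · rintro ⟨hb, h⟩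
          refine ⟨by omega, ?_⟩
          rintro ⟨k, hk1, hk2, hk3⟩
          exact h k (by omega) (by omega) hk3
        · rintro ⟨hb, h⟩
          exact ⟨by omega, fun k hk1 hk2 hk3 => h ⟨k, by omega, by omega, hk3⟩⟩
    by_cases hN : direction = "N"
    · subst hN
      simp only [String.reduceEq, reduceIte]
      rcases hcase with hc | ⟨-, -, -, h⟩ | ⟨h, -⟩ | ⟨h, -⟩ | ⟨h, -⟩ | ⟨-, hoob⟩ | ⟨huni, hx0, hxw, hy0, hyh⟩
      · omega
      · exact absurd rfl h
      · exact absurd h (by decide)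
      · exact absurd h (by decide)
      · exact absurd h (by decide)
      · have hA : pvLoopN park x count.toNat y = false := by
          cases hn : count.toNat with
          | zero => omega
          | succ n => simp only [pvLoopN]; rw [if_pos (Or.inl (by omega))]
        rw [hA, decide_eq_false (by omega), Bool.false_and]
      · have hwide : ∀ r ∈ park, x < (r.toList.length : Int) := by
          intro r hr
          have := huni r hr
          simp only [PySem.Str.len_eq] at this
          omega
        by_cases hya : 0 ≤ y - count
        · rw [Bool.eq_iff_iff, loopN_iff park x count.toNat y hy0, bside_iff,
            colSeg_contains_iff park x (y - count) y (by omega) hy0 hx0 hwide]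
          constructor
          · rintro ⟨hb, h⟩
            refine ⟨by omega, ?_⟩
            rintro ⟨k, hk1, hk2, hk3⟩
            exact h k (by omega) (by omega) hk3
          · rintro ⟨hb, h⟩
            exact ⟨by omega, fun k hk1 hk2 hk3 => h ⟨k, by omega, by omega, hk3⟩⟩
        · have hA : pvLoopN park x count.toNat y = false := by
            rw [← Bool.not_eq_true]
            rw [loopN_iff park x count.toNat y hy0]
            rintro ⟨h, -⟩; omega
          rw [hA, decide_eq_false (by omega), Bool.false_and]
    · simp only [if_neg hE, if_neg hW, if_neg hS, if_neg hN]
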